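-- pv_equiv track=rewrite | github.com/r2dt-bio/R2DT | utils/stockholm.py | compute_rf_consensus
-- ===== SOURCE A (Python) =====
-- IUPAC_CODES = {
--     frozenset("A"): "A",
--     frozenset("C"): "C",
--     frozenset("G"): "G",
--     frozenset("U"): "U",
--     frozenset("T"): "U",  # Treat T as U
--     frozenset("AG"): "R",  # puRine
--     frozenset("CU"): "Y",  # pYrimidine
--     frozenset("CT"): "Y",
--     frozenset("AC"): "M",  # aMino
--     frozenset("GU"): "K",  # Keto
--     frozenset("GT"): "K",
--     frozenset("AU"): "W",  # Weak
--     frozenset("AT"): "W",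
--     frozenset("CG"): "S",  # Strong
--     frozenset("CGU"): "B",  # not A
--     frozenset("CGT"): "B",
--     frozenset("AGU"): "D",  # not C
--     frozenset("AGT"): "D",
--     frozenset("ACU"): "H",  # not G
--     frozenset("ACT"): "H",
--     frozenset("ACG"): "V",  # not U
--     frozenset("ACGU"): "N",
--     frozenset("ACGT"): "N",
-- }
--
-- def compute_rf_consensus(sequences: dict[str, str], start: int, end: int) -> str:
--     """
--     Compute an Infernal-style RF consensus sequence for alignment columns.
--
--     Uses IUPAC ambiguity codes based on nucleotide frequencies:
--     - Single nucleotide if >50% of sequences have that nucleotide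
--     - IUPAC ambiguity code otherwise
--     - Lowercase for poorly conserved positions (<50% non-gap)
--
--     Args:
--         sequences: Dictionary of aligned sequences
--         start: Start column (0-based, inclusive)
--         end: End column (0-based, exclusive)
--
--     Returns:
--         Consensus sequence string
--     """
--     if not sequences:
--         return ""
--
--     consensus = []
--     seq_list = list(sequences.values())
--     num_seqs = len(seq_list)
--
--     for col in range(start, end):
--         # Collect nucleotides at this column
--         nucleotides = []
--         for seq in seq_list:
--             if col < len(seq):
--                 nt = seq[col].upper()
--                 if nt in "ACGUT":
--                     # Normalize T to U
--                     if nt == "T":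
--                         nt = "U"
--                     nucleotides.append(nt)
--
--         if not nucleotides:
--             # All gaps
--             consensus.append("-")
--             continue
--
--         # Calculate frequencies
--         total = len(nucleotides)
--         gap_fraction = 1 - (total / num_seqs)
--
--         counts = {}
--         for nt in nucleotides:
--             counts[nt] = counts.get(nt, 0) + 1
--
--         # Find the most common nucleotide(s)
--         max_count = max(counts.values())
--         max_freq = max_count / total
--
--         # Determine consensus character
--         if max_freq > 0.5:
--             # Single nucleotide dominates
--             consensus_nt = [nt for nt, c in counts.items() if c == max_count][0]
--         else:
--             # Use IUPAC code for observed nucleotides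
--             observed = frozenset(counts.keys())
--             consensus_nt = IUPAC_CODES.get(observed, "N")
--
--         # Use lowercase for poorly conserved positions (>50% gaps)
--         if gap_fraction > 0.5:
--             consensus_nt = consensus_nt.lower()
--
--         consensus.append(consensus_nt)
--
--     return "".join(consensus)
-- ===== SOURCE B (Python) =====
-- IUPAC_CODES = {
--     frozenset("A"): "A",
--     frozenset("C"): "C",
--     frozenset("G"): "G",
--     frozenset("U"): "U",
--     frozenset("T"): "U",
--     frozenset("AG"): "R",
--     frozenset("CU"): "Y",
--     frozenset("CT"): "Y",
--     frozenset("AC"): "M",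
--     frozenset("GU"): "K",
--     frozenset("GT"): "K",
--     frozenset("AU"): "W",
--     frozenset("AT"): "W",
--     frozenset("CG"): "S",
--     frozenset("CGU"): "B",
--     frozenset("CGT"): "B",
--     frozenset("AGU"): "D",
--     frozenset("AGT"): "D",
--     frozenset("ACU"): "H",
--     frozenset("ACT"): "H",
--     frozenset("ACG"): "V",
--     frozenset("ACGU"): "N",
--     frozenset("ACGT"): "N",
-- }
--
-- # normalized nucleotide per raw character (case-folded, T -> U); anything else is a gap
-- _NORM = {
--     "A": "A", "a": "A",
--     "C": "C", "c": "C",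
--     "G": "G", "g": "G",
--     "U": "U", "u": "U",
--     "T": "U", "t": "U",
-- }
--
--
-- def compute_rf_consensus(sequences: dict, start: int, end: int) -> str:
--     if not sequences:
--         return ""
--     vals = list(sequences.values())
--     num_seqs = len(vals)
--     width = max(end - start, 0)
--     # one pass over the sequences: per-column ordered count tables
--     cols = [{} for _ in range(width)]
--     lo = max(start, 0)
--     for seq in vals:
--         hi = min(end, len(seq))
--         for col in range(lo, hi):
--             nt = _NORM.get(seq[col])
--             if nt is not None:
--                 d = cols[col - start]
--                 d[nt] = d.get(nt, 0) + 1
--     # second pass: derive one consensus character per column from its counts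
--     out = []
--     for d in cols:
--         if not d:
--             out.append("-")
--             continue
--         total = sum(d.values())
--         max_count = max(d.values())
--         if 2 * max_count > total:
--             nt = next(k for k, c in d.items() if c == max_count)
--         else:
--             nt = IUPAC_CODES.get(frozenset(d), "N")
--         if 2 * (num_seqs - total) > num_seqs:
--             nt = nt.lower()
--         out.append(nt)
--     return "".join(out)
-- ===== Notes on version B (the rewrite author's own statement) =====
-- stated objective: alternative
-- what changed: Loop order is inverted: B makes one pass over the sequences building a per-column nucleotide count table (with a normalization dict replacing upper()+membership and integer comparisons replacing the float 0.5 thresholds), then a second pass over columns derives each consensus character, instead of A's per-column inner scan over all sequences collecting a nucleotide list.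
-- outside the precondition, e.g. on compute_rf_consensus({'a': 'ACGU'}, -2, 0): A returns 'GU', B returns '--'; on compute_rf_consensus({'a': 'A'}, -5, -4): A raises IndexError, B returns '-'
import Mathlib
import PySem

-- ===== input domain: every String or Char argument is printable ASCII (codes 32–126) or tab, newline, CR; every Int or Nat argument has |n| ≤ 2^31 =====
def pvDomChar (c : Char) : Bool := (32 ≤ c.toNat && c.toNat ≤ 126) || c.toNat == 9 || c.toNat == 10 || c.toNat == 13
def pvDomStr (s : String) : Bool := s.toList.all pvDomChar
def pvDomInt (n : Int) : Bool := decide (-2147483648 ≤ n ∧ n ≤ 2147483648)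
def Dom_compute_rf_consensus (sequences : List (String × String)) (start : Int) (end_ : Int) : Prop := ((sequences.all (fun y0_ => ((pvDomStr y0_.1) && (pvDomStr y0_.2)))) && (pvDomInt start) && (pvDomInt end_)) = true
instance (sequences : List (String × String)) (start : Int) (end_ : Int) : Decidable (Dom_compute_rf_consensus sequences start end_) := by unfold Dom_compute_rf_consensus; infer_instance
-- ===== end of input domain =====

-- B inverts A's loop order: one pass over the sequences builds per-column count tables, a second
-- pass over the columns derives the consensus characters (objective: alternative, same cost).

-- ===== PORT A =====
-- module constant IUPAC_CODES: frozenset keys become distinct-element char lists compared as sets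
def pvIupacTable : List (List Char × Char) :=
  [(['A'], 'A'), (['C'], 'C'), (['G'], 'G'), (['U'], 'U'), (['T'], 'U'),
   (['A','G'], 'R'), (['C','U'], 'Y'), (['C','T'], 'Y'), (['A','C'], 'M'),
   (['G','U'], 'K'), (['G','T'], 'K'), (['A','U'], 'W'), (['A','T'], 'W'),
   (['C','G'], 'S'), (['C','G','U'], 'B'), (['C','G','T'], 'B'),
   (['A','G','U'], 'D'), (['A','G','T'], 'D'), (['A','C','U'], 'H'), (['A','C','T'], 'H'),
   (['A','C','G'], 'V'), (['A','C','G','U'], 'N'), (['A','C','G','T'], 'N')]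

-- IUPAC_CODES.get(observed, "N"): first table entry whose key is set-equal to the observed frozenset
def pvIupacGet (obs : List Char) : Char :=
  match pvIupacTable.find? (fun p => PySem.Set.equal (PySem.Set.ofList p.1) obs) with
  | some p => p.2
  | none => 'N'

def compute_rf_consensus (sequences : List (String × String)) (start : Int) (end_ : Int) : String :=
  if sequences = [] then "" else
  let seq_list := (PySem.Dict.ofList sequences).values
  let num_seqs : Int := seq_list.length
  let consensus : List Char := (PySem.List.pyRange start end_).foldl (fun cons col =>
    let nucleotides : List Char := seq_list.foldl (fun acc seq =>
      if col < PySem.Str.len seq then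
        match PySem.Str.pyGet? seq col with  -- seq[col]; none = IndexError (negative col), outside Pre_
        | some ch =>
          let nt := PySem.Chars.upperChar ch  -- seq[col].upper(), exact for ASCII (the stated Dom)
          if nt ∈ ['A', 'C', 'G', 'U', 'T'] then
            acc ++ [if nt = 'T' then 'U' else nt]
          else acc
        | none => acc
      else acc) []
    if nucleotides = [] then cons ++ ['-'] else
    let total : Int := nucleotides.length
    let counts := nucleotides.foldl (fun d nt => d.insert nt (d.getD nt 0 + 1)) PySem.Dict.empty
    let max_count : Int := (PySem.List.max? counts.values id).getD 0  -- max(counts.values()), nonempty here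
    let consensus_nt : Char :=
      if 2 * max_count > total then  -- max_freq > 0.5, exact: max_count/total > 1/2 ↔ 2*max_count > total
        match PySem.List.pyGet? ((counts.items.filter (fun p => p.2 == max_count)).map (·.1)) 0 with
        | some nt => nt
        | none => 'N'  -- unreachable: max_count is attained
      else pvIupacGet (PySem.Set.ofList counts.keys)
    -- gap_fraction > 0.5 with gap_fraction = 1 - total/num_seqs, exact: ↔ 2*total < num_seqs
    let consensus_nt := if 2 * total < num_seqs then PySem.Chars.lowerChar consensus_nt else consensus_nt
    cons ++ [consensus_nt]) []
  String.ofList consensus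

-- ===== PORT B =====
-- _NORM: normalized nucleotide per raw character
def pvNorm : PySem.Dict Char Char :=
  PySem.Dict.ofList [('A','A'), ('a','A'), ('C','C'), ('c','C'), ('G','G'), ('g','G'),
                     ('U','U'), ('u','U'), ('T','U'), ('t','U')]

def compute_rf_consensus_alt (sequences : List (String × String)) (start : Int) (end_ : Int) : String :=
  if sequences = [] then "" else
  let vals := (PySem.Dict.ofList sequences).values
  let num_seqs : Int := vals.length
  let width : Nat := (end_ - start).toNat  -- max(end - start, 0)
  let lo : Int := max start 0
  let cols := vals.foldl (fun cols seq =>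
      let hi : Int := min end_ (PySem.Str.len seq)
      (PySem.List.pyRange lo hi).foldl (fun cols col =>
        match PySem.Str.pyGet? seq col with  -- seq[col], 0 ≤ lo ≤ col < len seq: always some
        | some ch =>
          match pvNorm.get? ch with
          | some nt => cols.modify (col - start).toNat (fun d => d.insert nt (d.getD nt 0 + 1))
          | none => cols
        | none => cols) cols)
    (List.replicate width (PySem.Dict.empty : PySem.Dict Char Int))
  let out : List Char := cols.foldl (fun out d =>
    if d.items = [] then out ++ ['-'] else
    let total : Int := d.values.sum
    let max_count : Int := (PySem.List.max? d.values id).getD 0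
    let nt : Char :=
      if 2 * max_count > total then
        match d.items.find? (fun p => p.2 == max_count) with
        | some p => p.1
        | none => 'N'  -- unreachable: max_count is attained
      else pvIupacGet (PySem.Set.ofList d.keys)
    let nt := if 2 * (num_seqs - total) > num_seqs then PySem.Chars.lowerChar nt else nt
    out ++ [nt]) []
  String.ofList out

-- ===== PRECONDITION & SPEC =====
-- Pre_ restricts to the natural domain: column indices are 0-based, so a negative start is excluded
-- whenever a column is actually read (nonempty alignment and start < end_); there Python's negative
-- indexing makes A raise IndexError on any sequence shorter than |start| and otherwise read
-- wrapped-around characters.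
def Pre_compute_rf_consensus (sequences : List (String × String)) (start : Int) (end_ : Int) : Prop :=
  sequences = [] ∨ end_ ≤ start ∨ 0 ≤ start
instance (sequences : List (String × String)) (start : Int) (end_ : Int) : Decidable (Pre_compute_rf_consensus sequences start end_) := by unfold Pre_compute_rf_consensus; infer_instance

def pvWitness_compute_rf_consensus : (List (String × String)) × Int × Int :=
  ([("s1", "ACGU-"), ("s2", "acgt-"), ("s3", "AGG..")], 0, 5)

def Spec_compute_rf_consensus (sequences : List (String × String)) (start : Int) (end_ : Int) (out : String) : Prop := out = compute_rf_consensus_alt sequences start end_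
instance (sequences : List (String × String)) (start : Int) (end_ : Int) (out : String) : Decidable (Spec_compute_rf_consensus sequences start end_ out) := by unfold Spec_compute_rf_consensus; infer_instance

-- ===== CLAIM (what is proved, stated in full; the proofs are below) =====
def Claim_equal_compute_rf_consensus : Prop := ∀ (sequences : List (String × String)) (start : Int) (end_ : Int), Dom_compute_rf_consensus sequences start end_ → Pre_compute_rf_consensus sequences start end_ → Spec_compute_rf_consensus sequences start end_ (compute_rf_consensus sequences start end_)

-- ===== LEMMAS AND PROOFS =====

-- A's per-sequence nucleotide extraction at one column, as an Option
def pvNtA (col : Int) (s : String) : Option Char :=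
  if col < PySem.Str.len s then
    match PySem.Str.pyGet? s col with
    | some ch =>
      let nt := PySem.Chars.upperChar ch
      if nt ∈ ['A', 'C', 'G', 'U', 'T'] then some (if nt = 'T' then 'U' else nt) else none
    | none => none
  else none

-- one update of a column's count table by a single sequence, as B performs it
def pvTouch (s : String) (col : Int) (d : PySem.Dict Char Int) : PySem.Dict Char Int :=
  match PySem.Str.pyGet? s col with
  | some ch =>
    match pvNorm.get? ch with
    | some nt => d.insert nt (d.getD nt 0 + 1)
    | none => d
  | none => d

-- the same update, as A contributes it
def pvStep (col : Int) (d : PySem.Dict Char Int) (s : String) : PySem.Dict Char Int :=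
  match pvNtA col s with
  | some nt => d.insert nt (d.getD nt 0 + 1)
  | none => d

-- the column count table both programs build
def pvCounts (vals : List String) (col : Int) : PySem.Dict Char Int :=
  PySem.Dict.counter (vals.filterMap (pvNtA col))

-- B's phase-2 character from a count table
def pvClassB (num_seqs : Int) (d : PySem.Dict Char Int) : Char :=
  if d.items = [] then '-' else
  let total : Int := d.values.sum
  let max_count : Int := (PySem.List.max? d.values id).getD 0
  let nt : Char :=
    if 2 * max_count > total then
      match d.items.find? (fun p => p.2 == max_count) with
      | some p => p.1
      | none => 'N'
    else pvIupacGet (PySem.Set.ofList d.keys)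
  if 2 * (num_seqs - total) > num_seqs then PySem.Chars.lowerChar nt else nt

set_option maxRecDepth 4096 in
lemma pvNorm_char (ch : Char) (h : ch.toNat < 127) :
    pvNorm.get? ch = (let nt := PySem.Chars.upperChar ch;
      if nt ∈ ['A', 'C', 'G', 'U', 'T'] then some (if nt = 'T' then 'U' else nt) else none) := by
  have key : ∀ n : Nat, n < 127 →
      (pvNorm.get? (Char.ofNat n) = (let nt := PySem.Chars.upperChar (Char.ofNat n);
        if nt ∈ ['A', 'C', 'G', 'U', 'T'] then some (if nt = 'T' then 'U' else nt) else none)) := by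
    decide
  have := key ch.toNat h
  rwa [Char.ofNat_toNat] at this

lemma pvRange_eq_map (a b : Int) :
    PySem.List.pyRange a b = (List.range (b - a).toNat).map (fun k : Nat => a + (k : Int)) := by
  by_cases hab : a < b
  · simp [PySem.List.pyRange, hab]
  · have h0 : (b - a).toNat = 0 := by omega
    simp [PySem.List.pyRange, hab, h0]

-- values of dict(sequences) come from the pairs' second components
lemma pvMem_values_update (l : List (String × String)) :
    ∀ (d : PySem.Dict String String) (v : String), v ∈ (d.update l).values →
      v ∈ d.values ∨ ∃ p ∈ l, v = p.2 := by
  induction l with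
  | nil => intro d v h; exact Or.inl h
  | cons p ps ih =>
    intro d v h
    rcases ih (d.insert p.1 p.2) v h with h' | ⟨q, hq, hv⟩
    · rcases PySem.Dict.mem_values_insert _ _ _ _ h' with h'' | h''
      · exact Or.inr ⟨p, List.mem_cons_self, h''⟩
      · exact Or.inl h''
    · exact Or.inr ⟨q, List.mem_cons_of_mem _ hq, hv⟩

lemma pvMem_values_ofList (sequences : List (String × String)) (v : String)
    (hv : v ∈ (PySem.Dict.ofList sequences).values) : ∃ p ∈ sequences, v = p.2 := by
  rcases pvMem_values_update sequences PySem.Dict.empty v hv with h | h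
  · simp [PySem.Dict.empty, PySem.Dict.values] at h
  · exact h

-- a valid read: 0 ≤ i < len s yields a character of s
lemma pvGet_some (s : String) (i : Int) (h0 : 0 ≤ i) (hlt : i < PySem.Str.len s) :
    ∃ c, PySem.Str.pyGet? s i = some c ∧ c ∈ s.toList := by
  have hlt' : i < (s.length : Int) := by
    simpa [PySem.Str.len, String.length_toList] using hlt
  have hidx : PySem.List.pyIdx? s.length i = some i.toNat := by
    simp [PySem.List.pyIdx?, h0, hlt']
  have hn : i.toNat < s.toList.length := by
    simp only [String.length_toList]; omega
  refine ⟨s.toList[i.toNat], ?_, List.getElem_mem hn⟩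
  simp [PySem.Str.pyGet?, PySem.Chars.pyGet?, PySem.List.pyGet?, hidx, List.getElem?_eq_getElem hn]

-- A's nucleotide-collecting inner loop is a filterMap
lemma pvNucsA (vals : List String) (col : Int) (acc : List Char) :
    vals.foldl (fun acc seq =>
      if col < PySem.Str.len seq then
        match PySem.Str.pyGet? seq col with
        | some ch =>
          let nt := PySem.Chars.upperChar ch
          if nt ∈ ['A', 'C', 'G', 'U', 'T'] then
            acc ++ [if nt = 'T' then 'U' else nt]
          else acc
        | none => acc
      else acc) acc = acc ++ vals.filterMap (pvNtA col) := by
  have hbody : ∀ (acc : List Char) (s : String),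
      (if col < PySem.Str.len s then
        match PySem.Str.pyGet? s col with
        | some ch =>
          let nt := PySem.Chars.upperChar ch
          if nt ∈ ['A', 'C', 'G', 'U', 'T'] then
            acc ++ [if nt = 'T' then 'U' else nt]
          else acc
        | none => acc
      else acc) = (match pvNtA col s with | some nt => acc ++ [nt] | none => acc) := by
    intro acc s
    simp only [pvNtA]
    split
    · cases PySem.Str.pyGet? s col with
      | none => rfl
      | some ch =>
        simp only []
        by_cases hm : PySem.Chars.upperChar ch ∈ ['A', 'C', 'G', 'U', 'T'] <;> simp [hm]
    · rfl
  calc vals.foldl _ acc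
      = vals.foldl (fun acc seq => match pvNtA col seq with
          | some nt => acc ++ [nt] | none => acc) acc := by
        congr 1; funext a s; exact hbody a s
    _ = (vals.filterMap (pvNtA col)).foldl (fun acc b => acc ++ [b]) acc := by
        rw [List.foldl_filterMap]; congr 1; funext x y; cases pvNtA col y <;> rfl
    _ = acc ++ (vals.filterMap (pvNtA col)).map id :=
        PySem.List.foldl_append_singleton_eq_map id _ acc
    _ = acc ++ vals.filterMap (pvNtA col) := by simp

-- A's per-column count loop builds exactly pvCounts
lemma pvFold_counter (vals : List String) (col : Int) :
    vals.foldl (fun d s => pvStep col d s) PySem.Dict.empty = pvCounts vals col := by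
  unfold pvCounts
  rw [← PySem.Dict.foldl_insert_getD_add_one_eq_counter, List.foldl_filterMap]
  congr 1; funext d s
  unfold pvStep; cases pvNtA col s <;> rfl

-- a fold of modifies over an index range, slot by slot
lemma pvInner {α : Type} (g : Nat → α → α) (n : Nat) (cols : List α) (k0 : Nat) (j : Nat) :
    ((List.range n).foldl (fun cs i => cs.modify (k0 + i) (g i)) cols)[j]? =
    if k0 ≤ j ∧ j < k0 + n then (cols[j]?).map (g (j - k0)) else cols[j]? := by
  induction n with
  | zero => simp only [List.range_zero, List.foldl_nil]; rw [if_neg (by omega)]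
  | succ n ih =>
    rw [List.range_succ, List.foldl_append, List.foldl_cons, List.foldl_nil,
        List.getElem?_modify, ih]
    by_cases hj : k0 + n = j
    · rw [if_neg (by omega), if_pos (by omega)]
      subst hj
      have h2 : k0 + n - k0 = n := by omega
      simp [h2]
    · by_cases hin : k0 ≤ j ∧ j < k0 + n
      · rw [if_pos hin, if_pos (by omega)]
        cases cols[j]? <;> simp [hj]
      · rw [if_neg hin, if_neg (by omega)]
        cases cols[j]? <;> simp [hj]

-- B touches a column exactly as A's pvStep does (columns read from index 0 up)
lemma pvTouch_eq_step (s : String) (col : Int) (h0 : 0 ≤ col)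
    (hdom : ∀ c ∈ s.toList, c.toNat < 127) (d : PySem.Dict Char Int) :
    pvTouch s col d = pvStep col d s := by
  by_cases hlt : col < PySem.Str.len s
  · obtain ⟨c, hc, hmem⟩ := pvGet_some s col h0 hlt
    have hnc := pvNorm_char c (hdom c hmem)
    unfold pvTouch pvStep pvNtA
    rw [hc, if_pos hlt]
    by_cases hm : PySem.Chars.upperChar c ∈ ['A', 'C', 'G', 'U', 'T'] <;> simp [hnc, hm]
  · have hnone : PySem.Str.pyGet? s col = none := by
      rcases hg : PySem.Str.pyGet? s col with _ | c
      · rfl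
      · exfalso
        have hlen : ¬ (col < (s.length : Int)) := by
          simp only [PySem.Str.len, String.length_toList] at hlt; omega
        simp [PySem.Str.pyGet?, PySem.Chars.pyGet?, PySem.List.pyGet?,
              PySem.List.pyIdx?, h0, hlen] at hg
    unfold pvTouch pvStep pvNtA
    rw [hnone, if_neg hlt]

-- B's phase-1 inner loop over one sequence, slot by slot
lemma pvInnerOne (s : String) (start end_ : Int) (hs : 0 ≤ start)
    (hdom : ∀ c ∈ s.toList, c.toNat < 127) (cols : List (PySem.Dict Char Int))
    (j : Nat) (hj : start + (j : Int) < end_) :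
    ((PySem.List.pyRange (max start 0) (min end_ (PySem.Str.len s))).foldl (fun cols col =>
        match PySem.Str.pyGet? s col with
        | some ch =>
          match pvNorm.get? ch with
          | some nt => cols.modify (col - start).toNat (fun d => d.insert nt (d.getD nt 0 + 1))
          | none => cols
        | none => cols) cols)[j]?
    = (cols[j]?).map (fun d => pvStep (start + (j : Int)) d s) := by
  have hlo : max start 0 = start := max_eq_left hs
  rw [hlo, pvRange_eq_map]
  have hbody : (fun (cs : List (PySem.Dict Char Int)) (i : Nat) =>
      match PySem.Str.pyGet? s (start + (i : Int)) with
      | some ch =>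
        match pvNorm.get? ch with
        | some nt => cs.modify ((start + (i : Int)) - start).toNat
            (fun d => d.insert nt (d.getD nt 0 + 1))
        | none => cs
      | none => cs)
      = (fun cs i => cs.modify (0 + i) (fun d => pvTouch s (start + (i : Int)) d)) := by
    funext cs i
    have hidx : ((start + (i : Int)) - start).toNat = i := by omega
    rcases hg : PySem.Str.pyGet? s (start + (i : Int)) with _ | ch
    · have hid : (fun d => pvTouch s (start + (i : Int)) d)
          = (id : PySem.Dict Char Int → PySem.Dict Char Int) := by
        funext d; unfold pvTouch; rw [hg]; rfl
      simp only []
      rw [hid, Nat.zero_add, List.modify_id]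
    · rcases hn : pvNorm.get? ch with _ | nt
      · have hid : (fun d => pvTouch s (start + (i : Int)) d)
            = (id : PySem.Dict Char Int → PySem.Dict Char Int) := by
          funext d; unfold pvTouch; rw [hg]; simp only []; rw [hn]; rfl
        simp only []
        rw [hn, hid, Nat.zero_add, List.modify_id]
      · have hf : (fun d : PySem.Dict Char Int => pvTouch s (start + (i : Int)) d)
            = (fun d => d.insert nt (d.getD nt 0 + 1)) := by
          funext d; unfold pvTouch; rw [hg]; simp only []; rw [hn]
        simp only []
        rw [hn, hf]
        simp only [hidx, Nat.zero_add]
  rw [List.foldl_map (f := fun k : Nat => start + (k : Int))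
        (l := List.range ((min end_ (PySem.Str.len s)) - start).toNat) (init := cols)]
  rw [hbody, pvInner]
  set n := ((min end_ (PySem.Str.len s)) - start).toNat with hn
  by_cases hjn : j < n
  · rw [if_pos (by omega)]
    have h0 : (0 : Nat) ≤ j := by omega
    have : j - 0 = j := by omega
    rw [this]
    congr 1
    funext d
    exact pvTouch_eq_step s (start + (j : Int)) (by omega) hdom d
  · rw [if_neg (by omega)]
    have hge : min end_ (PySem.Str.len s) ≤ start + (j : Int) := by omega
    have hlen : PySem.Str.len s ≤ start + (j : Int) := by
      rcases le_total end_ (PySem.Str.len s) with h | h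
      · rw [min_eq_left h] at hge; omega
      · rw [min_eq_right h] at hge; omega
    have hstep : (fun d : PySem.Dict Char Int => pvStep (start + (j : Int)) d s)
        = id := by
      funext d
      unfold pvStep pvNtA
      rw [if_neg (by omega)]
      rfl
    rw [hstep]
    simp

-- B's whole phase 1, slot by slot
lemma pvPhase1Gen (start end_ : Int) (hs : 0 ≤ start) :
    ∀ (vals : List String), (∀ s ∈ vals, ∀ c ∈ s.toList, c.toNat < 127) →
    ∀ (cols : List (PySem.Dict Char Int)) (j : Nat), start + (j : Int) < end_ →
    (vals.foldl (fun cols seq =>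
      let hi : Int := min end_ (PySem.Str.len seq)
      (PySem.List.pyRange (max start 0) hi).foldl (fun cols col =>
        match PySem.Str.pyGet? seq col with
        | some ch =>
          match pvNorm.get? ch with
          | some nt => cols.modify (col - start).toNat (fun d => d.insert nt (d.getD nt 0 + 1))
          | none => cols
        | none => cols) cols) cols)[j]?
    = (cols[j]?).map (fun d => vals.foldl (fun d s => pvStep (start + (j : Int)) d s) d) := by
  intro vals
  induction vals with
  | nil =>
    intro _ cols j _
    simp
  | cons s ss ih =>
    intro hdom cols j hj
    rw [List.foldl_cons]
    rw [ih (fun t ht => hdom t (List.mem_cons_of_mem _ ht)) _ j hj]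
    rw [pvInnerOne s start end_ hs (hdom s List.mem_cons_self) cols j hj]
    rw [Option.map_map]
    rfl

-- ===== the column-wise description of each port =====

-- A's per-column character
def pvClassA (vals : List String) (num_seqs : Int) (col : Int) : Char :=
  let nucleotides := vals.filterMap (pvNtA col)
  if nucleotides = [] then '-' else
  let total : Int := nucleotides.length
  let counts := nucleotides.foldl (fun d nt => d.insert nt (d.getD nt 0 + 1)) PySem.Dict.empty
  let max_count : Int := (PySem.List.max? counts.values id).getD 0
  let consensus_nt : Char :=
    if 2 * max_count > total then
      match PySem.List.pyGet? ((counts.items.filter (fun p => p.2 == max_count)).map (·.1)) 0 with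
      | some nt => nt
      | none => 'N'
    else pvIupacGet (PySem.Set.ofList counts.keys)
  if 2 * total < num_seqs then PySem.Chars.lowerChar consensus_nt else consensus_nt

lemma pvA_eq_map (vals : List String) (num_seqs : Int) (start end_ : Int) :
    (PySem.List.pyRange start end_).foldl (fun cons col =>
      let nucleotides : List Char := vals.foldl (fun acc seq =>
        if col < PySem.Str.len seq then
          match PySem.Str.pyGet? seq col with
          | some ch =>
            let nt := PySem.Chars.upperChar ch
            if nt ∈ ['A', 'C', 'G', 'U', 'T'] then
              acc ++ [if nt = 'T' then 'U' else nt]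
            else acc
          | none => acc
        else acc) []
      if nucleotides = [] then cons ++ ['-'] else
      let total : Int := nucleotides.length
      let counts := nucleotides.foldl (fun d nt => d.insert nt (d.getD nt 0 + 1)) PySem.Dict.empty
      let max_count : Int := (PySem.List.max? counts.values id).getD 0
      let consensus_nt : Char :=
        if 2 * max_count > total then
          match PySem.List.pyGet? ((counts.items.filter (fun p => p.2 == max_count)).map (·.1)) 0 with
          | some nt => nt
          | none => 'N'
        else pvIupacGet (PySem.Set.ofList counts.keys)
      let consensus_nt := if 2 * total < num_seqs then PySem.Chars.lowerChar consensus_nt else consensus_nt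
      cons ++ [consensus_nt]) []
    = (PySem.List.pyRange start end_).map (pvClassA vals num_seqs) := by
  have hbody : ∀ (cons : List Char) (col : Int),
      (let nucleotides : List Char := vals.foldl (fun acc seq =>
        if col < PySem.Str.len seq then
          match PySem.Str.pyGet? seq col with
          | some ch =>
            let nt := PySem.Chars.upperChar ch
            if nt ∈ ['A', 'C', 'G', 'U', 'T'] then
              acc ++ [if nt = 'T' then 'U' else nt]
            else acc
          | none => acc
        else acc) []
      if nucleotides = [] then cons ++ ['-'] else
      let total : Int := nucleotides.length
      let counts := nucleotides.foldl (fun d nt => d.insert nt (d.getD nt 0 + 1)) PySem.Dict.empty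
      let max_count : Int := (PySem.List.max? counts.values id).getD 0
      let consensus_nt : Char :=
        if 2 * max_count > total then
          match PySem.List.pyGet? ((counts.items.filter (fun p => p.2 == max_count)).map (·.1)) 0 with
          | some nt => nt
          | none => 'N'
        else pvIupacGet (PySem.Set.ofList counts.keys)
      let consensus_nt := if 2 * total < num_seqs then PySem.Chars.lowerChar consensus_nt else consensus_nt
      cons ++ [consensus_nt]) = cons ++ [pvClassA vals num_seqs col] := by
    intro cons col
    rw [pvNucsA vals col []]
    simp only [List.nil_append, pvClassA]
    split <;> rfl
  calc (PySem.List.pyRange start end_).foldl _ []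
      = (PySem.List.pyRange start end_).foldl
          (fun cons col => cons ++ [pvClassA vals num_seqs col]) [] := by
        congr 1; funext cons col; exact hbody cons col
    _ = [] ++ (PySem.List.pyRange start end_).map (pvClassA vals num_seqs) :=
        PySem.List.foldl_append_singleton_eq_map _ _ []
    _ = _ := by simp

lemma pvB_eq_map (num_seqs : Int) (cols : List (PySem.Dict Char Int)) :
    cols.foldl (fun out d =>
      if d.items = [] then out ++ ['-'] else
      let total : Int := d.values.sum
      let max_count : Int := (PySem.List.max? d.values id).getD 0
      let nt : Char :=
        if 2 * max_count > total then
          match d.items.find? (fun p => p.2 == max_count) with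
          | some p => p.1
          | none => 'N'
        else pvIupacGet (PySem.Set.ofList d.keys)
      let nt := if 2 * (num_seqs - total) > num_seqs then PySem.Chars.lowerChar nt else nt
      out ++ [nt]) []
    = cols.map (pvClassB num_seqs) := by
  calc cols.foldl _ []
      = cols.foldl (fun out d => out ++ [pvClassB num_seqs d]) [] := by
        congr 1; funext out d
        simp only [pvClassB]
        split <;> rfl
    _ = [] ++ cols.map (pvClassB num_seqs) :=
        PySem.List.foldl_append_singleton_eq_map _ _ []
    _ = _ := by simp

-- xs[0] is the first element
lemma pvGet0 {α : Type} (l : List α) : PySem.List.pyGet? l 0 = l.head? := by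
  cases l <;> simp [PySem.List.pyGet?, PySem.List.pyIdx?]

-- sum of a counter's values is the length of the counted list
lemma pvSum_counter (l : List Char) : (PySem.Dict.counter l).values.sum = (l.length : Int) := by
  have hperm : (PySem.Set.ofList l).Perm l.dedup := by
    rw [List.perm_ext_iff_of_nodup (PySem.Set.nodup_ofList l) l.nodup_dedup]
    intro x; simp [PySem.Set.mem_ofList, List.mem_dedup]
  calc (PySem.Dict.counter l).values.sum
      = ((PySem.Set.ofList l).map (fun k => (l.count k : Int))).sum := by
        simp only [PySem.Dict.values, PySem.Dict.items_counter, List.map_map]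
        rfl
    _ = (l.dedup.map (fun k => (l.count k : Int))).sum := (hperm.map _).sum_eq
    _ = ((l.dedup.map (fun k => l.count k)).sum : Int) := by
        induction l.dedup with
        | nil => simp
        | cons x xs ih => simp [ih]
    _ = (l.length : Int) := by rw [List.sum_map_count_dedup_eq_length]

lemma pvItems_ne (l : List Char) (h : l ≠ []) : (PySem.Dict.counter l).items ≠ [] := by
  rw [PySem.Dict.items_counter]
  rcases l with _ | ⟨x, xs⟩
  · exact absurd rfl h
  · have hx : x ∈ PySem.Set.ofList (x :: xs) := by
      rw [PySem.Set.mem_ofList]; exact List.mem_cons_self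
    intro hm
    rw [List.map_eq_nil_iff] at hm
    rw [hm] at hx
    exact absurd hx (List.not_mem_nil)

-- "[p for p in items if p[1] == m][0]" is "next(p for p in items if p[1] == m)"
lemma pvArg (l : List (Char × Int)) (m : Int) :
    (match PySem.List.pyGet? ((l.filter (fun p => p.2 == m)).map (·.1)) 0 with
     | some nt => nt | none => 'N')
    = (match l.find? (fun p => p.2 == m) with | some p => p.1 | none => 'N') := by
  rw [pvGet0, List.head?_map, List.head?_filter]
  cases l.find? (fun p => p.2 == m) <;> rfl

-- per-column classification agreement
lemma pvClassify (vals : List String) (num_seqs : Int) (col : Int) :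
    pvClassA vals num_seqs col = pvClassB num_seqs (pvCounts vals col) := by
  simp only [pvClassA, pvClassB, pvCounts]
  by_cases hne : vals.filterMap (pvNtA col) = []
  · rw [hne]; rfl
  · rw [PySem.Dict.foldl_insert_getD_add_one_eq_counter, if_neg hne,
        if_neg (pvItems_ne _ hne), pvSum_counter, pvArg]
    have pvGapIf : ∀ (t n : Int) (c : Char),
        (if 2 * t < n then PySem.Chars.lowerChar c else c)
        = (if 2 * (n - t) > n then PySem.Chars.lowerChar c else c) := by
      intro t n c
      by_cases h : 2 * t < n
      · rw [if_pos h, if_pos (show 2 * (n - t) > n by omega)]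
      · rw [if_neg h, if_neg (show ¬ 2 * (n - t) > n by omega)]
    exact pvGapIf _ _ _

-- B's phase-1 fold preserves the number of columns
lemma pvLenB (start end_ : Int) (vals : List String) (cols : List (PySem.Dict Char Int)) :
    (vals.foldl (fun cols seq =>
      let hi : Int := min end_ (PySem.Str.len seq)
      (PySem.List.pyRange (max start 0) hi).foldl (fun cols col =>
        match PySem.Str.pyGet? seq col with
        | some ch =>
          match pvNorm.get? ch with
          | some nt => cols.modify (col - start).toNat (fun d => d.insert nt (d.getD nt 0 + 1))
          | none => cols
        | none => cols) cols) cols).length = cols.length := by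
  induction vals generalizing cols with
  | nil => rfl
  | cons s ss ih =>
    rw [List.foldl_cons, ih]
    show (List.foldl (fun cols col =>
        match PySem.Str.pyGet? s col with
        | some ch =>
          match pvNorm.get? ch with
          | some nt => cols.modify (col - start).toNat (fun d => d.insert nt (d.getD nt 0 + 1))
          | none => cols
        | none => cols) cols
        (PySem.List.pyRange (max start 0) (min end_ (PySem.Str.len s)))).length = cols.length
    generalize PySem.List.pyRange (max start 0) (min end_ (PySem.Str.len s)) = l
    induction l generalizing cols with
    | nil => rfl
    | cons c cs ihl =>
      rw [List.foldl_cons, ihl]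
      rcases PySem.Str.pyGet? s c with _ | ch
      · rfl
      · simp only []
        rcases pvNorm.get? ch with _ | nt
        · rfl
        · simp [List.length_modify]

-- ===== VERDICT (by name: the statement is the Claim_ definition above) =====
theorem compute_rf_consensus_spec : Claim_equal_compute_rf_consensus := by
  intro sequences start end_ hdom hpre
  unfold Spec_compute_rf_consensus compute_rf_consensus compute_rf_consensus_alt
  by_cases hseq : sequences = []
  · rw [if_pos hseq, if_pos hseq]
  · rw [if_neg hseq, if_neg hseq]
    dsimp only []
    congr 1
    rw [pvA_eq_map, pvB_eq_map]
    rcases hpre with h | h | h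
    · exact absurd h hseq
    · -- empty column range: both sides are empty lists
      have hw0 : (end_ - start).toNat = 0 := by omega
      have hr : PySem.List.pyRange start end_ = [] := by
        rw [pvRange_eq_map, hw0]; rfl
      have hcl : ((PySem.Dict.ofList sequences).values.foldl (fun cols seq =>
          let hi : Int := min end_ (PySem.Str.len seq)
          (PySem.List.pyRange (max start 0) hi).foldl (fun cols col =>
            match PySem.Str.pyGet? seq col with
            | some ch =>
              match pvNorm.get? ch with
              | some nt => cols.modify (col - start).toNat (fun d => d.insert nt (d.getD nt 0 + 1))
              | none => cols
            | none => cols) cols)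
          (List.replicate (end_ - start).toNat (PySem.Dict.empty : PySem.Dict Char Int))).length = 0 := by
        rw [pvLenB, List.length_replicate, hw0]
      rw [hr, List.eq_nil_of_length_eq_zero hcl]
      rfl
    · -- main case: 0 ≤ start
      have hdomc : ∀ s ∈ (PySem.Dict.ofList sequences).values, ∀ c ∈ s.toList, c.toNat < 127 := by
        intro s hs c hc
        obtain ⟨p, hp, rfl⟩ := pvMem_values_ofList sequences s hs
        unfold Dom_compute_rf_consensus at hdom
        simp only [Bool.and_eq_true, List.all_eq_true] at hdom
        have hps := hdom.1.1 p hp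
        have hstr := hps.2
        unfold pvDomStr at hstr
        rw [List.all_eq_true] at hstr
        have hch := hstr c hc
        unfold pvDomChar at hch
        simp only [Bool.or_eq_true, Bool.and_eq_true, decide_eq_true_eq, beq_iff_eq] at hch
        omega
      have hcols : ((PySem.Dict.ofList sequences).values.foldl (fun cols seq =>
          let hi : Int := min end_ (PySem.Str.len seq)
          (PySem.List.pyRange (max start 0) hi).foldl (fun cols col =>
            match PySem.Str.pyGet? seq col with
            | some ch =>
              match pvNorm.get? ch with
              | some nt => cols.modify (col - start).toNat (fun d => d.insert nt (d.getD nt 0 + 1))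
              | none => cols
            | none => cols) cols)
          (List.replicate (end_ - start).toNat (PySem.Dict.empty : PySem.Dict Char Int)))
          = (List.range (end_ - start).toNat).map
              (fun j : Nat => pvCounts (PySem.Dict.ofList sequences).values (start + (j : Int))) := by
        apply List.ext_getElem?
        intro j
        by_cases hj : j < (end_ - start).toNat
        · rw [pvPhase1Gen start end_ h _ hdomc _ j (by omega)]
          rw [List.getElem?_replicate, if_pos hj, List.getElem?_map, List.getElem?_range hj]
          simp only [Option.map_some]
          rw [pvFold_counter]
        · rw [List.getElem?_eq_none, List.getElem?_eq_none]
          · simp only [List.length_map, List.length_range]; omega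
          · rw [pvLenB, List.length_replicate]; omega
      rw [hcols, pvRange_eq_map, List.map_map, List.map_map]
      apply List.map_congr_left
      intro j _
      simpa using pvClassify (PySem.Dict.ofList sequences).values
        ((PySem.Dict.ofList sequences).values.length : Int) (start + (j : Int))
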